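-- pv_equiv track=rewrite | github.com/veetirajaniemi/DSA | sales.py | sales
-- ===== SOURCE A (Python) =====
-- def sales(cars, customers) -> int:
--     cars = qsort(cars, 0, len(cars)-1) # sorting lists with quicksort
--     customers = qsort(customers, 0, len(customers)-1)
--     max = len(cars)-1 # max price of a car not bought yet
--     bought = 0
--     cindex = len(customers)-1
--     for i in range(0, len(cars)):
--         if (cindex < 0): # no more customers
--             break
--         if (customers[cindex] >= cars[max]): #car bought:)
--             bought += 1
--             cindex -= 1
--         max -= 1
--     return bought
--
-- def qsort(A, i, j):
--     pivotind = (i+j)//2 # finding a pivot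
--     A[pivotind], A[j] = A[j], A[pivotind] # pivot to the end
--     left = partition(A, i, j-1, A[j]) # partitition for left subarray
--     A[left], A[j] = A[j], A[left]
--
--     if (left - i > 1):
--         qsort(A, i, left -1)
--     if (j - left > 1):
--         qsort(A, left + 1, j)
--     return A
--
-- def partition(list, left, right, pivot): # left and right indexes, pivot as a number
--     while (left <= right): # not crossed
--         while (list[left] < pivot):
--             left += 1
--         while (right >= left and list[right] >= pivot):
--             right -= 1
--         if (right > left):
--             list[left], list[right] = list[right], list[left]
--     return left
-- ===== SOURCE B (Python) =====
-- def sales(cars, customers) -> int: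
--     cs = sorted(cars)
--     us = sorted(customers)
--     bought = 0
--     cj = 0
--     for u in us:                      # cheapest-first: each customer takes the
--         if cj < len(cs) and u >= cs[cj]:  # cheapest car still unsold, if affordable
--             bought += 1
--             cj += 1
--     return bought
-- ===== Notes on version B (the rewrite author's own statement) =====
-- stated objective: idiomatic
-- what changed: Replaces the hand-written in-place quicksort plus top-down greedy (largest customer vs largest unseen car) with builtin sorted() and a single bottom-up pass matching each customer, cheapest first, to the cheapest unsold car; same maximum-matching count.
import Mathlib
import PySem

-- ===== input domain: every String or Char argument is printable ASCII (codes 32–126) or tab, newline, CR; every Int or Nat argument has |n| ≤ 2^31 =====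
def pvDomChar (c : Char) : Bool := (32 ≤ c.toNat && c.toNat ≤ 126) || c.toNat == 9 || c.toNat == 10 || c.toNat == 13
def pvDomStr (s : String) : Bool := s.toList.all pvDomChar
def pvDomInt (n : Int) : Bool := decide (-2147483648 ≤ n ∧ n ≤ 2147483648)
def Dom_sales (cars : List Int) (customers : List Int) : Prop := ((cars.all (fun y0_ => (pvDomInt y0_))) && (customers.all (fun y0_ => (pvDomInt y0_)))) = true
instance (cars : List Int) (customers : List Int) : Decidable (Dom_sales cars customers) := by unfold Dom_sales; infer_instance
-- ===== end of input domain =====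

-- B replaces A's hand-written in-place quicksort + top-down greedy scan with builtin sort and a
-- single bottom-up pass (cheapest customer vs cheapest unsold car); note A sorts BOTH argument
-- lists in place (observable mutation), B does not — the equivalence proved here is about the
-- return value only.

-- ===== PORT A =====
def pvGet (A : List Int) (k : Int) : Int := (PySem.List.pyGet? A k).getD 0
def pvSet (A : List Int) (k : Int) (v : Int) : List Int := PySem.List.pySetD A k v
-- A[p], A[q] = A[q], A[p]
def pvSwap (A : List Int) (p q : Int) : List Int :=
  pvSet (pvSet A p (pvGet A q)) q (pvGet A p)

-- while (list[left] < pivot): left += 1        (fuel makes the loop total; never exhausted on Pre_)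
def pvAdvL : Nat → List Int → Int → Int → Int
  | 0, _, l, _ => l
  | f+1, A, l, p => if pvGet A l < p then pvAdvL f A (l+1) p else l

-- while (right >= left and list[right] >= pivot): right -= 1
def pvRetR : Nat → List Int → Int → Int → Int → Int
  | 0, _, _, r, _ => r
  | f+1, A, lv, r, p => if lv ≤ r ∧ p ≤ pvGet A r then pvRetR f A lv (r-1) p else r

-- partition's outer while (left <= right) loop; returns (list, left)
def pvPart : Nat → List Int → Int → Int → Int → List Int × Int
  | 0, A, l, _, _ => (A, l)
  | f+1, A, l, r, p =>
    if l ≤ r then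
      let l' := pvAdvL (A.length + 1) A l p
      let r' := pvRetR (A.length + 1) A l' r p
      let A' := if l' < r' then pvSwap A l' r' else A
      pvPart f A' l' r' p
    else (A, l)

-- qsort(A, i, j)
def pvQsort : Nat → List Int → Int → Int → List Int
  | 0, A, _, _ => A
  | f+1, A, i, j =>
    let pivotind := PySem.Int.floordiv (i + j) 2
    let A1 := pvSwap A pivotind j
    let pr := pvPart (2 * A1.length + 4) A1 i (j - 1) (pvGet A1 j)
    let A3 := pvSwap pr.1 pr.2 j
    let A4 := if 1 < pr.2 - i then pvQsort f A3 i (pr.2 - 1) else A3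
    if 1 < j - pr.2 then pvQsort f A4 (pr.2 + 1) j else A4

-- the 'for i in range(0, len(cars))' counting loop; state (bought, cindex, max)
def pvCount (customers cars : List Int) : Nat → Int → Int → Int → Int
  | 0, bought, _, _ => bought
  | n+1, bought, cindex, mx =>
    if cindex < 0 then bought
    else if pvGet cars mx ≤ pvGet customers cindex then
      pvCount customers cars n (bought + 1) (cindex - 1) (mx - 1)
    else pvCount customers cars n bought cindex (mx - 1)

def sales (cars : List Int) (customers : List Int) : Int :=
  let cars1 := pvQsort (cars.length + 1) cars 0 ((cars.length : Int) - 1)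
  let customers1 := pvQsort (customers.length + 1) customers 0 ((customers.length : Int) - 1)
  pvCount customers1 cars1 cars1.length 0 ((customers1.length : Int) - 1) ((cars1.length : Int) - 1)

-- ===== PORT B =====
def sales_alt (cars : List Int) (customers : List Int) : Int :=
  let cs := PySem.List.sorted cars (fun x => x) false
  let us := PySem.List.sorted customers (fun x => x) false
  (us.foldl (fun (st : Int × Int) u =>
      if st.2 < (cs.length : Int) ∧ PySem.List.pyGetD cs st.2 0 ≤ u
      then (st.1 + 1, st.2 + 1) else st) ((0 : Int), (0 : Int))).1

-- ===== PRECONDITION & SPEC =====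
-- A's qsort indexes A[-1] of the empty list (IndexError) when either argument is empty; B returns 0 there.
def Pre_sales (cars : List Int) (customers : List Int) : Prop := cars ≠ [] ∧ customers ≠ []
instance (cars : List Int) (customers : List Int) : Decidable (Pre_sales cars customers) := by
  unfold Pre_sales; infer_instance
def pvWitness_sales : List Int × List Int := ([3, 1, 2], [2, 2, 5])

def Spec_sales (cars : List Int) (customers : List Int) (out : Int) : Prop := out = sales_alt cars customers
instance (cars : List Int) (customers : List Int) (out : Int) : Decidable (Spec_sales cars customers out) := by
  unfold Spec_sales; infer_instance

-- ===== CLAIM (what is proved, stated in full; the proofs are below) =====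
def Claim_equal_sales : Prop := ∀ (cars : List Int) (customers : List Int), Dom_sales cars customers → Pre_sales cars customers → Spec_sales cars customers (sales cars customers)

-- ===== LEMMAS AND PROOFS =====

-- ---- basic index/update lemmas ----
theorem pvGet_eq (A : List Int) (k : Int) (h0 : 0 ≤ k) (h : k < (A.length : Int)) :
    pvGet A k = A[k.toNat]'(by omega) := by
  rw [pvGet, PySem.List.pyGet?_of_nonneg _ h0, List.getElem?_eq_getElem (by omega)]
  rfl


theorem length_pvSet (A : List Int) (k : Int) (v : Int) : (pvSet A k v).length = A.length := by
  simp [pvSet, PySem.List.length_pySetD]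


theorem pvSet_eq (A : List Int) (k : Int) (v : Int) (h0 : 0 ≤ k) :
    pvSet A k v = A.set k.toNat v := by
  simp [pvSet, PySem.List.pySetD_of_nonneg _ _ h0]


theorem pvGet_pvSet_self (A : List Int) (k : Int) (v : Int) (h0 : 0 ≤ k) (h : k < (A.length : Int)) :
    pvGet (pvSet A k v) k = v := by
  rw [pvSet_eq _ _ _ h0, pvGet_eq _ _ h0 (by simpa using h)]
  simp


theorem pvGet_pvSet_ne (A : List Int) (k k' : Int) (v : Int) (h0 : 0 ≤ k) (h0' : 0 ≤ k')
    (hne : k' ≠ k) : pvGet (pvSet A k v) k' = pvGet A k' := by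
  rw [pvSet_eq _ _ _ h0, pvGet, pvGet, PySem.List.pyGet?_of_nonneg _ h0', PySem.List.pyGet?_of_nonneg _ h0']
  rw [List.getElem?_set_ne (by omega)]


theorem length_pvSwap (A : List Int) (p q : Int) : (pvSwap A p q).length = A.length := by
  simp [pvSwap, length_pvSet]


theorem pvGet_pvSwap_fst (A : List Int) (p q : Int) (hp0 : 0 ≤ p) (hp : p < (A.length : Int))
    (hq0 : 0 ≤ q) (hq : q < (A.length : Int)) : pvGet (pvSwap A p q) p = pvGet A q := by
  unfold pvSwap
  by_cases hpq : p = q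
  · subst hpq
    rw [pvGet_pvSet_self _ _ _ hp0 (by rw [length_pvSet]; exact hp)]
  · rw [pvGet_pvSet_ne _ _ _ _ hq0 hp0 hpq,
      pvGet_pvSet_self _ _ _ hp0 (by exact_mod_cast hp)]


theorem pvGet_pvSwap_snd (A : List Int) (p q : Int) (hp0 : 0 ≤ p) (hp : p < (A.length : Int))
    (hq0 : 0 ≤ q) (hq : q < (A.length : Int)) : pvGet (pvSwap A p q) q = pvGet A p := by
  unfold pvSwap
  rw [pvGet_pvSet_self _ _ _ hq0 (by rw [length_pvSet]; exact hq)]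


theorem pvGet_pvSwap_other (A : List Int) (p q k : Int) (hp0 : 0 ≤ p) (hq0 : 0 ≤ q)
    (hk0 : 0 ≤ k) (h1 : k ≠ p) (h2 : k ≠ q) : pvGet (pvSwap A p q) k = pvGet A k := by
  unfold pvSwap
  rw [pvGet_pvSet_ne _ _ _ _ hq0 hk0 h2, pvGet_pvSet_ne _ _ _ _ hp0 hk0 h1]


theorem cons_set_perm (l : List Int) (m : Nat) (hm : m < l.length) (x : Int) :
    ((l[m] :: l.set m x)).Perm (x :: l) := by
  have h1 : l.set m x = l.take m ++ x :: l.drop (m + 1) := by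
    rw [List.set_eq_take_append_cons_drop, if_pos hm]
  have h2 : l = l.take m ++ l[m] :: l.drop (m + 1) := by
    conv_lhs => rw [← List.set_getElem_self hm]
    rw [List.set_eq_take_append_cons_drop, if_pos hm]
  rw [h1]
  conv_rhs => rw [h2]
  exact List.Perm.trans (List.Perm.cons _ List.perm_middle)
    (List.Perm.trans (List.Perm.swap _ _ _) (List.Perm.cons _ List.perm_middle.symm))


theorem set_set_perm (l : List Int) : ∀ (a b : Nat) (ha : a < l.length) (hb : b < l.length),
    ((l.set a (l[b]'hb)).set b (l[a]'ha)).Perm l := by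
  induction l with
  | nil => intro a b ha _; simp at ha
  | cons x t IH =>
    intro a b ha hb
    match a, b with
    | 0, 0 => simp
    | 0, m+1 =>
      simp only [List.set_cons_zero, List.set_cons_succ, List.getElem_cons_succ,
        List.getElem_cons_zero]
      exact cons_set_perm t m (by simpa using hb) x
    | m+1, 0 =>
      simp only [List.set_cons_zero, List.set_cons_succ, List.getElem_cons_succ,
        List.getElem_cons_zero]
      exact cons_set_perm t m (by simpa using ha) x
    | a+1, b+1 =>
      simp only [List.set_cons_succ, List.getElem_cons_succ]
      exact List.Perm.cons _ (IH a b (by simpa using ha) (by simpa using hb))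


theorem pvSwap_perm (A : List Int) (p q : Int) (hp0 : 0 ≤ p) (hp : p < (A.length : Int))
    (hq0 : 0 ≤ q) (hq : q < (A.length : Int)) : (pvSwap A p q).Perm A := by
  unfold pvSwap
  rw [pvGet_eq _ _ hq0 hq, pvGet_eq _ _ hp0 hp, pvSet_eq _ _ _ hp0, pvSet_eq _ _ _ hq0]
  exact set_set_perm A p.toNat q.toNat (by omega) (by omega)


-- ---- segment-values-preserved machinery ----
theorem pvGet_natCast (A : List Int) (i : Nat) (h : i < A.length) : pvGet A (i : Int) = A[i] := by
  rw [pvGet_eq A _ (by positivity) (by exact_mod_cast h)]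
  simp

theorem seg_forall_of (A B : List Int) (lo hi : Int) (P : Int → Prop)
    (hperm : B.Perm A) (hlen : B.length = A.length)
    (hout : ∀ k : Int, 0 ≤ k → (k < lo ∨ hi < k) → pvGet B k = pvGet A k)
    (hlo : 0 ≤ lo) (hlohi : lo ≤ hi + 1) (hhi : hi < (A.length : Int))
    (hP : ∀ k, lo ≤ k → k ≤ hi → P (pvGet A k)) :
    ∀ k, lo ≤ k → k ≤ hi → P (pvGet B k) := by
  intro k hk1 hk2
  have htake : B.take lo.toNat = A.take lo.toNat := by
    apply List.ext_getElem (by simp [hlen])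
    intro i h1 h2
    rw [List.length_take] at h1 h2
    have hiB : i < B.length := by omega
    have hiA : i < A.length := by omega
    have h' := hout (i : Int) (by positivity) (Or.inl (by omega))
    rw [pvGet_natCast B i hiB, pvGet_natCast A i hiA] at h'
    simpa [List.getElem_take] using h'
  have hdrop : B.drop (hi + 1).toNat = A.drop (hi + 1).toNat := by
    apply List.ext_getElem (by simp [hlen])
    intro i h1 h2
    rw [List.length_drop] at h1 h2
    have hiB : (hi + 1).toNat + i < B.length := by omega
    have hiA : (hi + 1).toNat + i < A.length := by omega
    have h' := hout (((hi + 1).toNat + i : Nat) : Int) (by positivity) (Or.inr (by push_cast; omega))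
    rw [pvGet_natCast B _ hiB, pvGet_natCast A _ hiA] at h'
    simpa [List.getElem_drop] using h'
  have hB2 : B = B.take lo.toNat ++
      ((B.drop lo.toNat).take ((hi + 1).toNat - lo.toNat) ++ B.drop (hi + 1).toNat) := by
    conv_lhs => rw [← List.take_append_drop lo.toNat B]
    congr 1
    conv_lhs => rw [← List.take_append_drop ((hi + 1).toNat - lo.toNat) (B.drop lo.toNat)]
    congr 1
    rw [List.drop_drop]
    congr 1
    omega
  have hA2 : A = A.take lo.toNat ++
      ((A.drop lo.toNat).take ((hi + 1).toNat - lo.toNat) ++ A.drop (hi + 1).toNat) := by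
    conv_lhs => rw [← List.take_append_drop lo.toNat A]
    congr 1
    conv_lhs => rw [← List.take_append_drop ((hi + 1).toNat - lo.toNat) (A.drop lo.toNat)]
    congr 1
    rw [List.drop_drop]
    congr 1
    omega
  have hsegperm : ((B.drop lo.toNat).take ((hi + 1).toNat - lo.toNat)).Perm
      ((A.drop lo.toNat).take ((hi + 1).toNat - lo.toNat)) := by
    have hp := hperm
    rw [hB2, hA2] at hp
    rw [htake, hdrop] at hp
    exact (List.perm_append_right_iff _).mp ((List.perm_append_left_iff _).mp hp)
  have hmem : pvGet B k ∈ (B.drop lo.toNat).take ((hi + 1).toNat - lo.toNat) := by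
    rw [pvGet_eq B k (by omega) (by omega)]
    refine List.mem_iff_getElem.mpr ⟨k.toNat - lo.toNat, by simp; omega, ?_⟩
    simp only [List.getElem_take, List.getElem_drop]
    congr 1
    omega
  obtain ⟨i, hi2, hval⟩ := List.mem_iff_getElem.mp (hsegperm.mem_iff.mp hmem)
  have hi3 : i < (hi + 1).toNat - lo.toNat ∧ lo.toNat + i < A.length := by
    simp at hi2; omega
  simp only [List.getElem_take, List.getElem_drop] at hval
  have hval2 : pvGet A ((lo.toNat + i : Nat) : Int) = pvGet B k := by
    rw [pvGet_natCast A _ hi3.2]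
    exact hval
  rw [← hval2]
  exact hP _ (by push_cast; omega) (by push_cast; omega)

-- ---- the inner while loops ----
theorem advL_spec : ∀ (fuel : Nat) (A : List Int) (l p s : Int), l ≤ s → p ≤ pvGet A s →
    (s - l).toNat < fuel →
    l ≤ pvAdvL fuel A l p ∧ pvAdvL fuel A l p ≤ s ∧ p ≤ pvGet A (pvAdvL fuel A l p) ∧
    ∀ k, l ≤ k → k < pvAdvL fuel A l p → pvGet A k < p := by
  intro fuel
  induction fuel with
  | zero => intro A l p s h1 h2 h3; omega
  | succ f IH =>
    intro A l p s h1 h2 h3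
    simp only [pvAdvL]
    by_cases hcond : pvGet A l < p
    · rw [if_pos hcond]
      have hls : l ≠ s := by intro h; rw [h] at hcond; omega
      obtain ⟨a, b, c, d⟩ := IH A (l + 1) p s (by omega) h2 (by omega)
      refine ⟨by omega, b, c, fun k hk1 hk2 => ?_⟩
      rcases eq_or_lt_of_le hk1 with h | h
      · rw [← h]; exact hcond
      · exact d k (by omega) hk2
    · rw [if_neg hcond]
      exact ⟨le_refl l, h1, by omega, fun k hk1 hk2 => by omega⟩

theorem retR_spec : ∀ (fuel : Nat) (A : List Int) (lv r p : Int), lv - 1 ≤ r →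
    (r - (lv - 1)).toNat < fuel →
    lv - 1 ≤ pvRetR fuel A lv r p ∧ pvRetR fuel A lv r p ≤ r ∧
    (pvRetR fuel A lv r p = lv - 1 ∨ pvGet A (pvRetR fuel A lv r p) < p) ∧
    ∀ k, pvRetR fuel A lv r p < k → k ≤ r → p ≤ pvGet A k := by
  intro fuel
  induction fuel with
  | zero => intro A lv r p h1 h3; omega
  | succ f IH =>
    intro A lv r p h1 h3
    simp only [pvRetR]
    by_cases hcond : lv ≤ r ∧ p ≤ pvGet A r
    · rw [if_pos hcond]
      obtain ⟨a, b, c, d⟩ := IH A lv (r - 1) p (by omega) (by omega)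
      refine ⟨a, by omega, c, fun k hk1 hk2 => ?_⟩
      rcases eq_or_lt_of_le hk2 with h | h
      · rw [h]; exact hcond.2
      · exact d k hk1 (by omega)
    · rw [if_neg hcond]
      refine ⟨h1, le_refl r, ?_, fun k hk1 hk2 => by omega⟩
      by_cases hlr : lv ≤ r
      · right
        rcases not_and_or.mp hcond with h | h
        · omega
        · omega
      · left; omega

-- ---- the partition loop ----
theorem part_spec (fuel : Nat) (A0 : List Int) (lo hi p : Int) :
    ∀ (A : List Int) (l r : Int),
    A.length = A0.length → A.Perm A0 →
    (∀ k : Int, 0 ≤ k → (k < lo ∨ hi < k) → pvGet A k = pvGet A0 k) →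
    0 ≤ lo → hi < (A0.length : Int) - 1 →
    lo ≤ l → l ≤ hi + 1 → r ≤ hi → l ≤ r + 1 →
    (∀ k, lo ≤ k → k < l → pvGet A k < p) →
    (∀ k, r < k → k ≤ hi → p ≤ pvGet A k) →
    pvGet A (hi + 1) = p →
    (2 * (r - l + 1).toNat + 2 ≤ fuel ∨ (pvGet A l < p ∧ 2 * (r - l + 1).toNat + 1 ≤ fuel)) →
    (pvPart fuel A l r p).1.length = A0.length ∧
    (pvPart fuel A l r p).1.Perm A0 ∧
    (∀ k : Int, 0 ≤ k → (k < lo ∨ hi < k) → pvGet (pvPart fuel A l r p).1 k = pvGet A0 k) ∧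
    lo ≤ (pvPart fuel A l r p).2 ∧ (pvPart fuel A l r p).2 ≤ hi + 1 ∧
    (∀ k, lo ≤ k → k < (pvPart fuel A l r p).2 → pvGet (pvPart fuel A l r p).1 k < p) ∧
    (∀ k, (pvPart fuel A l r p).2 ≤ k → k ≤ hi → p ≤ pvGet (pvPart fuel A l r p).1 k) := by
  induction fuel with
  | zero =>
    intro A l r _ _ _ _ _ _ _ _ _ _ _ _ hfuel
    exfalso; rcases hfuel with h | h <;> omega
  | succ f IH =>
    intro A l r hlen hperm hout hlo hhi hll hlh hrh hlr hleft hright hsent hfuel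
    have hnA : (A.length : Int) = (A0.length : Int) := by exact_mod_cast hlen
    by_cases hc : l ≤ r
    · have hsr : p ≤ pvGet A (r + 1) := by
        by_cases hr : r + 1 ≤ hi
        · exact hright (r + 1) (by omega) hr
        · have he : r + 1 = hi + 1 := by omega
          rw [he, hsent]
      obtain ⟨ha1, ha2, ha3, ha4⟩ := advL_spec (A.length + 1) A l p (r + 1) (by omega) hsr (by omega)
      set l' := pvAdvL (A.length + 1) A l p with hl'def
      obtain ⟨hb1, hb2, hb3, hb4⟩ := retR_spec (A.length + 1) A l' r p (by omega) (by omega)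
      set r' := pvRetR (A.length + 1) A l' r p with hr'def
      have hstep : pvPart (f + 1) A l r p
          = pvPart f (if l' < r' then pvSwap A l' r' else A) l' r' p := by
        simp only [pvPart, if_pos hc]
        rw [hr'def, hl'def]
      rw [hstep]
      have hrightA : ∀ k, r' < k → k ≤ hi → p ≤ pvGet A k := fun k hk1 hk2 => by
        by_cases hk3 : k ≤ r
        · exact hb4 k hk1 hk3
        · exact hright k (by omega) hk2
      have hleftA : ∀ k, lo ≤ k → k < l' → pvGet A k < p := fun k hk1 hk2 => by
        by_cases hk3 : k < l
        · exact hleft k hk1 hk3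
        · exact ha4 k (by omega) hk2
      by_cases hsw : l' < r'
      · rw [if_pos hsw]
        have hl'0 : (0:Int) ≤ l' := by omega
        have hr'0 : (0:Int) ≤ r' := by omega
        have hl'n : l' < (A.length : Int) := by omega
        have hr'n : r' < (A.length : Int) := by omega
        have hvr' : pvGet A r' < p := by
          rcases hb3 with h | h
          · omega
          · exact h
        have hswl : pvGet (pvSwap A l' r') l' = pvGet A r' :=
          pvGet_pvSwap_fst A l' r' hl'0 hl'n hr'0 hr'n
        have hswr : pvGet (pvSwap A l' r') r' = pvGet A l' :=
          pvGet_pvSwap_snd A l' r' hl'0 hl'n hr'0 hr'n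
        apply IH (pvSwap A l' r') l' r'
        · rw [length_pvSwap]; exact hlen
        · exact (pvSwap_perm A l' r' hl'0 hl'n hr'0 hr'n).trans hperm
        · intro k hk0 hk
          rw [pvGet_pvSwap_other A l' r' k hl'0 hr'0 hk0 (by omega) (by omega)]
          exact hout k hk0 hk
        · exact hlo
        · exact hhi
        · omega
        · omega
        · omega
        · omega
        · intro k hk1 hk2
          rw [pvGet_pvSwap_other A l' r' k hl'0 hr'0 (by omega) (by omega) (by omega)]
          exact hleftA k hk1 hk2
        · intro k hk1 hk2
          rw [pvGet_pvSwap_other A l' r' k hl'0 hr'0 (by omega) (by omega) (by omega)]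
          exact hrightA k hk1 hk2
        · rw [pvGet_pvSwap_other A l' r' (hi + 1) hl'0 hr'0 (by omega) (by omega) (by omega)]
          exact hsent
        · right
          constructor
          · rw [hswl]; exact hvr'
          · rcases hfuel with h | h
            · omega
            · have hl1 : l + 1 ≤ l' := by
                rcases eq_or_lt_of_le ha1 with he | he
                · exfalso; rw [← he] at ha3; omega
                · omega
              omega
      · rw [if_neg hsw]
        have hne : r' < l' := by
          rcases hb3 with h | h
          · omega
          · by_cases he : r' = l'
            · exfalso; rw [he] at h; omega
            · omega
        have hres : pvPart f A l' r' p = (A, l') := by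
          cases f with
          | zero => rfl
          | succ g => simp only [pvPart, if_neg (by omega : ¬ l' ≤ r')]
        rw [hres]
        exact ⟨hlen, hperm, hout, by omega, by omega, hleftA,
          fun k hk1 hk2 => hrightA k (by omega) hk2⟩
    · have hres : pvPart (f + 1) A l r p = (A, l) := by
        simp only [pvPart, if_neg hc]
      rw [hres]
      exact ⟨hlen, hperm, hout, by omega, by omega, hleft,
        fun k hk1 hk2 => hright k (by omega) hk2⟩

-- ---- quicksort ----
theorem qsort_spec (fuel : Nat) : ∀ (A : List Int) (i j : Int),
    0 ≤ i → i ≤ j → j < (A.length : Int) → (j - i).toNat + 1 ≤ fuel →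
    (pvQsort fuel A i j).length = A.length ∧
    (pvQsort fuel A i j).Perm A ∧
    (∀ k : Int, 0 ≤ k → (k < i ∨ j < k) → pvGet (pvQsort fuel A i j) k = pvGet A k) ∧
    (∀ u v, i ≤ u → u ≤ v → v ≤ j → pvGet (pvQsort fuel A i j) u ≤ pvGet (pvQsort fuel A i j) v) := by
  induction fuel with
  | zero => intro A i j _ _ _ hfuel; omega
  | succ f IH =>
    intro A i j h0i hij hjn hfuel
    set pivotind := PySem.Int.floordiv (i + j) 2 with hpiv_def
    set A1 := pvSwap A pivotind j with hA1_def
    set pr := pvPart (2 * A1.length + 4) A1 i (j - 1) (pvGet A1 j) with hpr_def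
    set A3 := pvSwap pr.1 pr.2 j with hA3_def
    set A4 := (if 1 < pr.2 - i then pvQsort f A3 i (pr.2 - 1) else A3) with hA4_def
    have hstep : pvQsort (f + 1) A i j
        = if 1 < j - pr.2 then pvQsort f A4 (pr.2 + 1) j else A4 := by
      simp only [pvQsort]
      rw [hA4_def, hA3_def, hpr_def, hA1_def, hpiv_def]
    rw [hstep]
    have hpb := PySem.Int.floordiv_two_mid_bounds (lo := i) (hi := j) hij
    rw [← hpiv_def] at hpb
    have hlen1 : A1.length = A.length := length_pvSwap A pivotind j
    have hlen1' : (A1.length : Int) = (A.length : Int) := by exact_mod_cast hlen1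
    have hperm1 : A1.Perm A := pvSwap_perm A pivotind j (by omega) (by omega) (by omega) hjn
    have hout1 : ∀ k : Int, 0 ≤ k → (k < i ∨ j < k) → pvGet A1 k = pvGet A k := by
      intro k hk0 hk
      exact pvGet_pvSwap_other A pivotind j k (by omega) (by omega) hk0 (by omega) (by omega)
    obtain ⟨hq1, hq2, hq3, hq4, hq5, hq6, hq7⟩ :=
      part_spec (2 * A1.length + 4) A1 i (j - 1) (pvGet A1 j) A1 i (j - 1)
        rfl (List.Perm.refl _) (fun _ _ _ => rfl) h0i (by omega)
        (le_refl i) (by omega) (le_refl _) (by omega)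
        (fun k hk1 hk2 => absurd hk2 (by omega))
        (fun k hk1 hk2 => absurd hk2 (by omega))
        (by rw [show j - 1 + 1 = j by ring])
        (Or.inl (by omega))
    rw [← hpr_def] at hq1 hq2 hq3 hq4 hq5 hq6 hq7
    have hq1' : (pr.1.length : Int) = (A.length : Int) := by rw [hq1]; exact hlen1'
    have hq5' : pr.2 ≤ j := by omega
    have hA2j : pvGet pr.1 j = pvGet A1 j := hq3 j (by omega) (Or.inr (by omega))
    have hlen3 : A3.length = A.length := by rw [hA3_def, length_pvSwap, hq1, hlen1]
    have hlen3' : (A3.length : Int) = (A.length : Int) := by exact_mod_cast hlen3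
    have hperm3 : A3.Perm A :=
      ((pvSwap_perm pr.1 pr.2 j (by omega) (by omega) (by omega) (by omega)).trans hq2).trans hperm1
    have hout3 : ∀ k : Int, 0 ≤ k → (k < i ∨ j < k) → pvGet A3 k = pvGet A k := by
      intro k hk0 hk
      rw [hA3_def, pvGet_pvSwap_other pr.1 pr.2 j k (by omega) (by omega) hk0 (by omega) (by omega)]
      rw [hq3 k hk0 (by omega)]
      exact hout1 k hk0 hk
    have h3left : pvGet A3 pr.2 = pvGet A1 j := by
      rw [hA3_def, pvGet_pvSwap_fst pr.1 pr.2 j (by omega) (by omega) (by omega) (by omega)]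
      exact hA2j
    have h3low : ∀ k, i ≤ k → k < pr.2 → pvGet A3 k < pvGet A1 j := by
      intro k hk1 hk2
      rw [hA3_def, pvGet_pvSwap_other pr.1 pr.2 j k (by omega) (by omega) (by omega) (by omega) (by omega)]
      exact hq6 k hk1 hk2
    have h3high : ∀ k, pr.2 < k → k ≤ j → pvGet A1 j ≤ pvGet A3 k := by
      intro k hk1 hk2
      rcases eq_or_lt_of_le hk2 with he | hlt
      · rw [he, hA3_def, pvGet_pvSwap_snd pr.1 pr.2 j (by omega) (by omega) (by omega) (by omega)]
        exact hq7 pr.2 (le_refl _) (by omega)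
      · rw [hA3_def, pvGet_pvSwap_other pr.1 pr.2 j k (by omega) (by omega) (by omega) (by omega) (by omega)]
        exact hq7 k (by omega) (by omega)
    have hcom : A4.length = A3.length ∧ A4.Perm A3 ∧
        (∀ k : Int, 0 ≤ k → (k < i ∨ pr.2 - 1 < k) → pvGet A4 k = pvGet A3 k) ∧
        (∀ u v, i ≤ u → u ≤ v → v ≤ pr.2 - 1 → pvGet A4 u ≤ pvGet A4 v) := by
      by_cases hrec1 : 1 < pr.2 - i
      · have hA4 : A4 = pvQsort f A3 i (pr.2 - 1) := by rw [hA4_def, if_pos hrec1]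
        rw [hA4]
        exact IH A3 i (pr.2 - 1) h0i (by omega) (by omega) (by omega)
      · have hA4 : A4 = A3 := by rw [hA4_def, if_neg hrec1]
        rw [hA4]
        exact ⟨rfl, List.Perm.refl _, fun _ _ _ => rfl,
          fun u v h1 h2 h3 => by have : u = v := by omega
                                 rw [this]⟩
    obtain ⟨hw1, hw2, hw3, hw4⟩ := hcom
    have hw1' : (A4.length : Int) = (A.length : Int) := by rw [hw1]; exact hlen3'
    have h4left : ∀ k, i ≤ k → k < pr.2 → pvGet A4 k < pvGet A1 j := by
      intro k hk1 hk2
      exact seg_forall_of A3 A4 i (pr.2 - 1) (fun x => x < pvGet A1 j) hw2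
        (by rw [hw1]) hw3 h0i (by omega) (by omega)
        (fun k' hk1' hk2' => h3low k' hk1' (by omega)) k hk1 (by omega)
    have h4mid : pvGet A4 pr.2 = pvGet A1 j := by
      rw [hw3 pr.2 (by omega) (Or.inr (by omega))]
      exact h3left
    have h4high : ∀ k, pr.2 < k → k ≤ j → pvGet A1 j ≤ pvGet A4 k := by
      intro k hk1 hk2
      rw [hw3 k (by omega) (Or.inr (by omega))]
      exact h3high k hk1 hk2
    set A5 := (if 1 < j - pr.2 then pvQsort f A4 (pr.2 + 1) j else A4) with hA5_def
    have hcom5 : A5.length = A4.length ∧ A5.Perm A4 ∧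
        (∀ k : Int, 0 ≤ k → (k < pr.2 + 1 ∨ j < k) → pvGet A5 k = pvGet A4 k) ∧
        (∀ u v, pr.2 + 1 ≤ u → u ≤ v → v ≤ j → pvGet A5 u ≤ pvGet A5 v) := by
      by_cases hrec2 : 1 < j - pr.2
      · have hA5 : A5 = pvQsort f A4 (pr.2 + 1) j := by rw [hA5_def, if_pos hrec2]
        rw [hA5]
        exact IH A4 (pr.2 + 1) j (by omega) (by omega) (by omega) (by omega)
      · have hA5 : A5 = A4 := by rw [hA5_def, if_neg hrec2]
        rw [hA5]
        exact ⟨rfl, List.Perm.refl _, fun _ _ _ => rfl,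
          fun u v h1 h2 h3 => by have : u = v := by omega
                                 rw [this]⟩
    obtain ⟨hv1, hv2, hv3, hv4⟩ := hcom5
    refine ⟨by rw [hv1, hw1, hlen3], (hv2.trans hw2).trans hperm3, ?_, ?_⟩
    · intro k hk0 hk
      rw [hv3 k hk0 (by omega), hw3 k hk0 (by omega)]
      exact hout3 k hk0 hk
    · intro u v hu huv hv
      have g5low : ∀ k, i ≤ k → k < pr.2 → pvGet A5 k < pvGet A1 j := by
        intro k hk1 hk2
        rw [hv3 k (by omega) (Or.inl (by omega))]
        exact h4left k hk1 hk2
      have g5mid : pvGet A5 pr.2 = pvGet A1 j := by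
        rw [hv3 pr.2 (by omega) (Or.inl (by omega))]
        exact h4mid
      have g5high : ∀ k, pr.2 < k → k ≤ j → pvGet A1 j ≤ pvGet A5 k := by
        intro k hk1 hk2
        exact seg_forall_of A4 A5 (pr.2 + 1) j (fun x => pvGet A1 j ≤ x) hv2
          (by rw [hv1]) hv3 (by omega) (by omega) (by omega)
          (fun k' hk1' hk2' => h4high k' (by omega) hk2') k (by omega) hk2
      have g5sortlow : ∀ u' v', i ≤ u' → u' ≤ v' → v' ≤ pr.2 - 1 → pvGet A5 u' ≤ pvGet A5 v' := by
        intro u' v' h1 h2 h3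
        rw [hv3 u' (by omega) (Or.inl (by omega)), hv3 v' (by omega) (Or.inl (by omega))]
        exact hw4 u' v' h1 h2 h3
      rcases lt_trichotomy v pr.2 with hvc | hvc | hvc
      · exact g5sortlow u v hu huv (by omega)
      · rcases eq_or_lt_of_le huv with he | hlt
        · rw [he]
        · rw [hvc, g5mid]
          exact le_of_lt (g5low u hu (by omega))
      · rcases lt_trichotomy u pr.2 with huc | huc | huc
        · exact le_of_lt (lt_of_lt_of_le (g5low u hu huc) (g5high v hvc hv))
        · rw [huc, g5mid]
          exact g5high v hvc hv
        · exact hv4 u v (by omega) huv hv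

theorem qsort_sorts (A : List Int) (hA : A ≠ []) :
    pvQsort (A.length + 1) A 0 ((A.length : Int) - 1) = PySem.List.sorted A (fun x => x) false := by
  have hlen0 : 0 < A.length := List.length_pos_of_ne_nil hA
  obtain ⟨hs1, hs2, _, hs4⟩ := qsort_spec (A.length + 1) A 0 ((A.length : Int) - 1)
    (le_refl 0) (by omega) (by omega) (by omega)
  set R := pvQsort (A.length + 1) A 0 ((A.length : Int) - 1) with hR
  have hpair : R.Pairwise (fun a b => a ≤ b) := by
    rw [List.pairwise_iff_getElem]
    intro a b ha hb hab
    have hb' : (b : Int) ≤ (A.length : Int) - 1 := by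
      have : b < A.length := by rw [← hs1]; exact hb
      omega
    have h1 := hs4 (a : Int) (b : Int) (by positivity) (by exact_mod_cast le_of_lt hab) hb'
    rwa [pvGet_natCast R a ha, pvGet_natCast R b hb] at h1
  exact PySem.List.eq_of_perm_of_pairwise_le_of_injective (fun x => x) (fun a b h => h)
    (hs2.trans (PySem.List.sorted_perm A _ false).symm) hpair (PySem.List.sorted_pairwise A _)

-- ---- the two greedy counts as list recursions ----
def fA : List Int → List Int → Int
  | [], _ => 0
  | _ :: _, [] => 0
  | c :: C, u :: U => if c ≤ u then 1 + fA C U else fA C (u :: U)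

def fB : List Int → List Int → Int
  | _, [] => 0
  | [], _ :: _ => 0
  | c :: C, u :: U => if c ≤ u then 1 + fB C U else fB (c :: C) U

theorem fA_nil_right (C : List Int) : fA C [] = 0 := by cases C <;> rfl
theorem fB_nil_left (U : List Int) : fB [] U = 0 := by cases U <;> rfl

theorem pvCount_eq : ∀ (n : Nat) (customers cars : List Int) (bought cindex : Int),
    n ≤ cars.length → cindex < (customers.length : Int) → -1 ≤ cindex →
    pvCount customers cars n bought cindex ((n : Int) - 1)
      = bought + fA ((cars.take n).reverse) ((customers.take (cindex + 1).toNat).reverse) := by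
  intro n
  induction n with
  | zero =>
    intro customers cars bought cindex _ _ _
    simp [pvCount, fA]
  | succ m IHn =>
    intro customers cars bought cindex h1 h2 h3
    have hidx : ((m + 1 : Nat) : Int) - 1 = ((m : Nat) : Int) := by push_cast; ring
    rw [hidx]
    simp only [pvCount]
    by_cases hcneg : cindex < 0
    · rw [if_pos hcneg]
      have he : (cindex + 1).toNat = 0 := by omega
      rw [he]
      simp [fA_nil_right]
    · rw [if_neg hcneg]
      have hc0 : 0 ≤ cindex := by omega
      have hcl : cindex.toNat < customers.length := by omega
      have hml : m < cars.length := by omega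
      have hg1 : pvGet cars ((m : Nat) : Int) = cars[m] := pvGet_natCast cars m hml
      have hg2 : pvGet customers cindex = customers[cindex.toNat] := by
        rw [pvGet_eq customers cindex hc0 (by omega)]
      have hd1 : (cars.take (m + 1)).reverse = cars[m] :: (cars.take m).reverse := by
        rw [List.take_succ, List.getElem?_eq_getElem hml]
        simp
      have hd2 : (customers.take (cindex + 1).toNat).reverse
          = customers[cindex.toNat] :: (customers.take cindex.toNat).reverse := by
        have he : (cindex + 1).toNat = cindex.toNat + 1 := by omega
        rw [he, List.take_succ, List.getElem?_eq_getElem hcl]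
        simp
      rw [hg1, hg2]
      split_ifs with hcond
      · rw [IHn customers cars (bought + 1) (cindex - 1) (by omega) (by omega) (by omega)]
        rw [hd1, hd2]
        simp only [fA]
        rw [if_pos hcond]
        rw [show (cindex - 1 + 1).toNat = cindex.toNat by omega]
        ring
      · rw [IHn customers cars bought cindex (by omega) h2 h3]
        rw [hd1, hd2]
        simp only [fA]
        rw [if_neg hcond]

theorem foldl_eq_fB : ∀ (us cs : List Int) (b cj : Int), 0 ≤ cj →
    (us.foldl (fun (st : Int × Int) u =>
      if st.2 < (cs.length : Int) ∧ PySem.List.pyGetD cs st.2 0 ≤ u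
      then (st.1 + 1, st.2 + 1) else st) (b, cj)).1
    = b + fB (cs.drop cj.toNat) us := by
  intro us
  induction us with
  | nil =>
    intro cs b cj _
    have h0 : fB (cs.drop cj.toNat) [] = 0 := by cases cs.drop cj.toNat <;> rfl
    simp [h0]
  | cons u us IH =>
    intro cs b cj hcj
    simp only [List.foldl_cons]
    by_cases hc : cj < (cs.length : Int) ∧ PySem.List.pyGetD cs cj 0 ≤ u
    · rw [if_pos hc]
      obtain ⟨hlt, hle⟩ := hc
      have hcl : cj.toNat < cs.length := by omega
      have hgv : PySem.List.pyGetD cs cj 0 = cs[cj.toNat] := by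
        rw [PySem.List.pyGetD_of_nonneg cs 0 hcj, List.getD_eq_getElem cs 0 hcl]
      have hdrop : cs.drop cj.toNat = cs[cj.toNat] :: cs.drop (cj.toNat + 1) :=
        List.drop_eq_getElem_cons hcl
      rw [IH cs (b + 1) (cj + 1) (by omega)]
      rw [show (cj + 1).toNat = cj.toNat + 1 by omega, hdrop]
      simp only [fB]
      rw [if_pos (by rw [← hgv]; exact hle)]
      ring
    · rw [if_neg hc]
      rw [IH cs b cj hcj]
      by_cases hlen : cj < (cs.length : Int)
      · have hcl : cj.toNat < cs.length := by omega
        have hnle : ¬ PySem.List.pyGetD cs cj 0 ≤ u := fun h => hc ⟨hlen, h⟩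
        have hgv : PySem.List.pyGetD cs cj 0 = cs[cj.toNat] := by
          rw [PySem.List.pyGetD_of_nonneg cs 0 hcj, List.getD_eq_getElem cs 0 hcl]
        have hdrop : cs.drop cj.toNat = cs[cj.toNat] :: cs.drop (cj.toNat + 1) :=
          List.drop_eq_getElem_cons hcl
        rw [hdrop]
        simp only [fB]
        rw [if_neg (by rw [← hgv]; exact hnle)]
      · have hdrop : cs.drop cj.toNat = [] := List.drop_eq_nil_of_le (by omega)
        rw [hdrop, fB_nil_left, fB_nil_left]

-- ---- greedy duality: top-down matching = bottom-up matching on sorted lists ----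
theorem fB_drop_big (c : Int) : ∀ (U C : List Int), (∀ u ∈ U, u < c) →
    fB (C ++ [c]) U = fB C U := by
  intro U
  induction U with
  | nil => intro C _; rw [show fB (C ++ [c]) [] = 0 from by cases C ++ [c] <;> rfl,
      show fB C [] = 0 from by cases C <;> rfl]
  | cons v U' IH =>
    intro C h
    cases C with
    | nil =>
      simp only [List.nil_append, fB]
      rw [if_neg (by have := h v (by simp); omega)]
      rw [(by simpa using IH [] (fun x hx => h x (by simp [hx])) : fB [c] U' = fB [] U'),
        fB_nil_left]
    | cons a C' =>
      simp only [List.cons_append, fB]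
      by_cases hav : a ≤ v
      · rw [if_pos hav, if_pos hav, IH C' (fun x hx => h x (by simp [hx]))]
      · rw [if_neg hav, if_neg hav]
        exact IH (a :: C') (fun x hx => h x (by simp [hx]))

theorem fB_match_top (c u : Int) (hcu : c ≤ u) : ∀ (U C : List Int), (∀ a ∈ C, a ≤ u) →
    fB (C ++ [c]) (U ++ [u]) = 1 + fB C U := by
  intro U
  induction U with
  | nil =>
    intro C hC
    cases C with
    | nil =>
      simp only [List.nil_append, fB]
      rw [if_pos hcu]
    | cons a C' =>
      simp only [List.cons_append, List.nil_append, fB]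
      rw [if_pos (hC a (by simp))]
  | cons v U' IH =>
    intro C hC
    cases C with
    | nil =>
      simp only [List.nil_append, List.cons_append, fB]
      by_cases hcv : c ≤ v
      · rw [if_pos hcv, fB_nil_left]
      · rw [if_neg hcv]
        rw [(by simpa using IH [] (by intro a ha; simp at ha) :
          fB [c] (U' ++ [u]) = 1 + fB [] U')]
        rw [fB_nil_left]
    | cons a C' =>
      simp only [List.cons_append, fB]
      by_cases hav : a ≤ v
      · rw [if_pos hav, if_pos hav, IH C' (fun x hx => hC x (by simp [hx]))]
      · rw [if_neg hav, if_neg hav]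
        exact IH (a :: C') hC

theorem fA_eq_fB : ∀ (C U : List Int), C.Pairwise (· ≤ ·) → U.Pairwise (· ≤ ·) →
    fA C.reverse U.reverse = fB C U := by
  intro C
  induction C using List.reverseRecOn with
  | nil =>
    intro U _ _
    simp only [List.reverse_nil]
    rw [fB_nil_left]
    rfl
  | append_singleton C₀ c IH =>
    intro U hC hU
    rcases List.eq_nil_or_concat U with hUe | ⟨U₀, u, rfl⟩
    · rw [hUe, List.reverse_nil, fA_nil_right,
        show fB (C₀ ++ [c]) [] = 0 from by cases C₀ ++ [c] <;> rfl]
    · simp only [List.concat_eq_append] at hU ⊢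
      obtain ⟨hC1, _, hC3⟩ := List.pairwise_append.mp hC
      obtain ⟨hU1, _, hU3⟩ := List.pairwise_append.mp hU
      have hCle : ∀ a ∈ C₀, a ≤ c := fun a ha => hC3 a ha c (by simp)
      have hUle : ∀ v ∈ U₀, v ≤ u := fun v hv => hU3 v hv u (by simp)
      simp only [List.reverse_append, List.reverse_singleton, List.singleton_append, fA]
      by_cases hcu : c ≤ u
      · rw [if_pos hcu, IH U₀ hC1 hU1,
          fB_match_top c u hcu U₀ C₀ (fun a ha => le_trans (hCle a ha) hcu)]
      · rw [if_neg hcu]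
        rw [show u :: U₀.reverse = (U₀ ++ [u]).reverse from by simp]
        rw [IH (U₀ ++ [u]) hC1 hU]
        rw [fB_drop_big c (U₀ ++ [u]) C₀ (fun v hv => by
          rcases List.mem_append.mp hv with h | h
          · exact lt_of_le_of_lt (hUle v h) (not_le.mp hcu)
          · simp at h; omega)]

-- ===== VERDICT (by name: the statement is the Claim_ definition above) =====
theorem sales_spec : Claim_equal_sales := by
  intro cars customers _ hpre
  obtain ⟨hcne, hune⟩ := hpre
  show sales cars customers = sales_alt cars customers
  simp only [sales, sales_alt]
  rw [qsort_sorts cars hcne, qsort_sorts customers hune]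
  set cs := PySem.List.sorted cars (fun x => x) false with hcs
  set us := PySem.List.sorted customers (fun x => x) false with hus
  have husne : 0 < us.length := by
    rw [hus, PySem.List.length_sorted]
    exact List.length_pos_of_ne_nil hune
  rw [pvCount_eq cs.length us cs 0 ((us.length : Int) - 1) (le_refl _) (by omega) (by omega)]
  rw [show ((us.length : Int) - 1 + 1).toNat = us.length by omega]
  rw [List.take_length, List.take_length]
  rw [foldl_eq_fB us cs 0 0 (le_refl 0)]
  rw [show (0 : Int).toNat = 0 from rfl, List.drop_zero]
  rw [fA_eq_fB cs us (PySem.List.sorted_pairwise cars (fun x => x))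
    (PySem.List.sorted_pairwise customers (fun x => x))]
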